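-- pv_equiv track=rewrite | github.com/kazutamu/advent_of_code | day6/main.py | transform
-- ===== SOURCE A (Python) =====
-- def transform(inputs: list[str]) -> list[str]:
--     result: list[str] = []
--     result.append("")
--     for j in range(len(inputs[0]) - 1, -1, -1):
--         for i in range(len(inputs)):
--             char = inputs[i][j]
--             result[-1] += inputs[i][j]
--             if char in ["+", "*"]:
--                 result.append("")
--
--     return result
-- ===== SOURCE B (Python) =====
-- def transform(inputs: list[str]) -> list[str]:
--     # Build the flattened column-major stream first, then segment it in one
--     # separate pass using slice boundaries.
--     s = ''.join(inputs[i][j]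
--                 for j in range(len(inputs[0]) - 1, -1, -1)
--                 for i in range(len(inputs)))
--     out: list[str] = []
--     prev = 0
--     for k, c in enumerate(s):
--         if c == '+' or c == '*':
--             out.append(s[prev:k + 1])
--             prev = k + 1
--     out.append(s[prev:])
--     return out
-- ===== Notes on version B (the rewrite author's own statement) =====
-- stated objective: faster
-- what changed: A interleaves traversal and segmentation, repeatedly rebuilding the growing last segment with result[-1] += char inside the nested column loop; B first materialises the column-major character stream with one join and then segments it in a separate single pass, cutting segments out as slices at delimiter boundaries.
import Mathlib
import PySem

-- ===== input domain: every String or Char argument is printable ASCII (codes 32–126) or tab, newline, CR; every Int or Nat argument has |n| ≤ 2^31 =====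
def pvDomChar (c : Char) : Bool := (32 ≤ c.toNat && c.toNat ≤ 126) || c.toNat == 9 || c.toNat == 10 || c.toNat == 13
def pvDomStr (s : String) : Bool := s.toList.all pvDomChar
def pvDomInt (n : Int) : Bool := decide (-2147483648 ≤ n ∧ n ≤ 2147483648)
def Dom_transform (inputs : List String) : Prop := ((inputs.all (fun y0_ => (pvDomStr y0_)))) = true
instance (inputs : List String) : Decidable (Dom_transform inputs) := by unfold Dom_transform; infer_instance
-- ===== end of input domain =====

-- B builds the column-major character stream first (one join) and segments it in a
-- separate slice-based pass, avoiding A's repeated `result[-1] += char` string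
-- rebuilding (measured faster on large inputs).


-- ===== PORT A =====
-- char in ["+", "*"]
def pvDelim (c : Char) : Bool := c == '+' || c == '*'

-- result[-1] += c  (result is never empty where A runs this)
def pvAppendLast (r : List (List Char)) (c : Char) : List (List Char) :=
  r.dropLast ++ [r.getLastD [] ++ [c]]

-- inputs[i][j] (in range under Pre_; segments kept as List Char, turned into
-- String at the end — strings ported through PySem.Chars as PYSEM.md directs)
def pvCharAt (inputs : List String) (i j : Int) : Char :=
  PySem.List.pyGetD ((PySem.List.pyGetD inputs i "").toList) j ' '

def transform (inputs : List String) : List String :=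
  let result : List (List Char) :=
    (PySem.List.pyRange (PySem.Str.len (PySem.List.pyGetD inputs 0 "") - 1) (-1) (-1)).foldl
      (fun result j =>
        (PySem.List.pyRange 0 (inputs.length : Int) 1).foldl
          (fun result i =>
            let ch := pvCharAt inputs i j
            let result := pvAppendLast result ch
            if pvDelim ch then result ++ [[]] else result)
          result)
      [[]]
  result.map (fun cs => String.ofList cs)

-- ===== PORT B =====
-- s = ''.join(inputs[i][j] for j in range(len(inputs[0])-1,-1,-1) for i in range(len(inputs)))
def pvStream (inputs : List String) : List Char :=
  (PySem.List.pyRange (PySem.Str.len (PySem.List.pyGetD inputs 0 "") - 1) (-1) (-1)).flatMap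
    (fun j => (PySem.List.pyRange 0 (inputs.length : Int) 1).map (fun i => pvCharAt inputs i j))

def transform_alt (inputs : List String) : List String :=
  let s : List Char := pvStream inputs
  let r : List (List Char) × Int :=
    (PySem.List.enumerate s 0).foldl
      (fun p kc =>
        if pvDelim kc.2 then
          (p.1 ++ [PySem.List.slice s (some p.2) (some (kc.1 + 1))], kc.1 + 1)
        else p)
      ([], 0)
  (r.1 ++ [PySem.List.slice s (some r.2) none]).map (fun cs => String.ofList cs)

-- ===== PRECONDITION & SPEC =====
-- Pre_ excludes exactly the inputs where the Python A raises IndexError: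
-- an empty list (inputs[0]) and ragged input with a row shorter than row 0.
def Pre_transform (inputs : List String) : Prop :=
  inputs ≠ [] ∧ ∀ r ∈ inputs, PySem.Str.len (inputs.headD "") ≤ PySem.Str.len r
instance (inputs : List String) : Decidable (Pre_transform inputs) := by unfold Pre_transform; infer_instance
def pvWitness_transform : List String := ["ab+", "cd*"]

def Spec_transform (inputs : List String) (out : List String) : Prop := out = transform_alt inputs
instance (inputs : List String) (out : List String) : Decidable (Spec_transform inputs out) := by unfold Spec_transform; infer_instance

-- ===== CLAIM (what is proved, stated in full; the proofs are below) =====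
def Claim_equal_transform : Prop := ∀ (inputs : List String), Dom_transform inputs → Pre_transform inputs → Spec_transform inputs (transform inputs)

-- ===== LEMMAS AND PROOFS =====

-- reference segmentation of a character stream
def pvSeg (cur : List Char) : List Char → List (List Char)
  | [] => [cur]
  | c :: t => if pvDelim c then (cur ++ [c]) :: pvSeg [] t else pvSeg (cur ++ [c]) t

-- A's per-character step
def pvStepA (r : List (List Char)) (c : Char) : List (List Char) :=
  let r' := pvAppendLast r c
  if pvDelim c then r' ++ [[]] else r'

theorem pvAppendLast_concat (out : List (List Char)) (cur : List Char) (c : Char) :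
    pvAppendLast (out ++ [cur]) c = out ++ [cur ++ [c]] := by
  simp [pvAppendLast]

theorem foldl_stepA_seg (cs : List Char) : ∀ (out : List (List Char)) (cur : List Char),
    cs.foldl pvStepA (out ++ [cur]) = out ++ pvSeg cur cs := by
  induction cs with
  | nil => intro out cur; simp [pvSeg]
  | cons c t ih =>
    intro out cur
    by_cases h : pvDelim c
    · have : pvStepA (out ++ [cur]) c = (out ++ [cur ++ [c]]) ++ [[]] := by
        simp [pvStepA, pvAppendLast_concat, h]
      simp only [List.foldl_cons, this, List.append_assoc]
      rw [show (([cur ++ [c]] : List (List Char)) ++ [[]]) = [cur ++ [c]] ++ [([] : List Char)] from rfl,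
          ← List.append_assoc, ih (out ++ [cur ++ [c]]) []]
      simp [pvSeg, h]
    · have : pvStepA (out ++ [cur]) c = out ++ [cur ++ [c]] := by
        simp [pvStepA, pvAppendLast_concat, h]
      simp only [List.foldl_cons, this, ih]
      simp [pvSeg, h]

theorem LB_aux (s : List Char) : ∀ (t : List Char) (k prev : ℕ) (out : List (List Char)),
    prev ≤ k → t = s.drop k →
    (let r := (PySem.List.enumerate t (k : Int)).foldl
        (fun p kc =>
          if pvDelim kc.2 then
            (p.1 ++ [PySem.List.slice s (some p.2) (some (kc.1 + 1))], kc.1 + 1)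
          else p)
        (out, (prev : Int));
      r.1 ++ [PySem.List.slice s (some r.2) none]) =
    out ++ pvSeg ((s.drop prev).take (k - prev)) t := by
  intro t
  induction t with
  | nil =>
    intro k prev out hpk ht
    have hk : s.length ≤ k := by
      by_contra h
      have := List.drop_eq_nil_iff.mp ht.symm
      omega
    have hlen : (s.drop prev).length ≤ k - prev := by
      rw [List.length_drop]; omega
    simp [PySem.List.enumerate, pvSeg, PySem.List.slice_from_natCast,
      List.take_of_length_le hlen]
  | cons c t ih =>
    intro k prev out hpk ht
    have hklen : k < s.length := by
      by_contra h
      have hnil : s.drop k = [] := List.drop_eq_nil_iff.mpr (by omega)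
      rw [hnil] at ht
      exact List.cons_ne_nil _ _ ht
    have hdd : (s.drop prev).drop (k - prev) = c :: t := by
      rw [List.drop_drop, show prev + (k - prev) = k from by omega, ← ht]
    have ht' : t = s.drop (k + 1) := by
      have h1 : (s.drop k).tail = s.drop (k + 1) := by rw [List.tail_drop]
      rw [← ht] at h1
      simpa using h1
    have hext : (s.drop prev).take (k + 1 - prev) = (s.drop prev).take (k - prev) ++ [c] := by
      rw [show k + 1 - prev = (k - prev) + 1 from by omega, List.take_add, hdd]
      simp
    have cast1 : ((k : Int) + 1) = ((k + 1 : ℕ) : Int) := by push_cast; ring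
    rw [PySem.List.enumerate_cons]
    by_cases h : pvDelim c
    · simp only [List.foldl_cons, h, if_true]
      rw [cast1]
      have := ih (k + 1) (k + 1)
        (out ++ [PySem.List.slice s (some (prev : Int)) (some ((k + 1 : ℕ) : Int))])
        (le_refl _) ht'
      simp only [this]
      have hsl : PySem.List.slice s (some ((prev : ℕ) : Int)) (some ((k + 1 : ℕ) : Int))
          = (s.drop prev).take (k - prev) ++ [c] := by
        rw [PySem.List.slice_natCast, hext]
      rw [hsl]
      simp [pvSeg, h]
    · simp only [List.foldl_cons, h, Bool.false_eq_true, if_false]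
      rw [cast1]
      have := ih (k + 1) prev out (by omega) ht'
      simp only [this]
      rw [hext]
      simp [pvSeg, h]

theorem nested_eq (inputs : List String) (L M : List Int) (init : List (List Char)) :
    L.foldl
      (fun result j =>
        M.foldl
          (fun result i =>
            if pvDelim (pvCharAt inputs i j) = true then
              pvAppendLast result (pvCharAt inputs i j) ++ [[]]
            else pvAppendLast result (pvCharAt inputs i j))
          result)
      init
    = List.foldl pvStepA init (L.flatMap (fun j => M.map (fun i => pvCharAt inputs i j))) := by
  rw [List.flatMap_def, List.foldl_flatten, List.foldl_map]
  congr 1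
  funext r j
  rw [List.foldl_map]
  simp only [pvStepA]

theorem transform_eq_seg (inputs : List String) :
    transform inputs = (pvSeg [] (pvStream inputs)).map (fun cs => String.ofList cs) := by
  have core : List.foldl pvStepA [[]] (pvStream inputs) = pvSeg [] (pvStream inputs) := by
    have := foldl_stepA_seg (pvStream inputs) [] []
    simpa using this
  simp only [transform]
  rw [nested_eq]
  exact congrArg _ core

theorem transform_alt_eq_seg (inputs : List String) :
    transform_alt inputs = (pvSeg [] (pvStream inputs)).map (fun cs => String.ofList cs) := by
  have h := LB_aux (pvStream inputs) (pvStream inputs) 0 0 [] (le_refl _) List.drop_zero.symm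
  simp only [Nat.cast_zero, Nat.sub_zero, List.drop_zero, List.take_zero] at h
  simp only [transform_alt]
  rw [h, List.nil_append]

-- ===== VERDICT (by name: the statement is the Claim_ definition above) =====
theorem transform_spec : Claim_equal_transform := by
  intro inputs _ _
  unfold Spec_transform
  rw [transform_eq_seg, transform_alt_eq_seg]
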